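-- pv_equiv track=rewrite | github.com/craigwatkins/nn_compression | canonical_huffman/dictionary.py | decompress_canonical_dict
-- ===== SOURCE A (Python) =====
-- def decompress_canonical_dict(compress_lengths, sorted_symbols):
--     """
--     Parameters
--     ----------
--     compress_lengths : List of integers
--         The number of bits for each sublist of sorted symbols, zero values
--         are used if there are no symbols of a specific length
--     sorted_symbols : Two dimensional list of binary strings
--         Each sublist grouped by bit size, then sorted in lexigraphical order
--
--     Returns
--     -------
--     canonical_codes : Dictionary
--          canonical code: symbol, reverse of compression dict
--     """
--
--     canonical_codes = {}
--     prev_code = 0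
--     bit_diff = 0  # difference in bit length between successive codes
--     symbol_index = 0
--     first_code_found = False
--
--     for i in range(0, len(compress_lengths)):
--         num_symbols = compress_lengths[i]
--         num_bits_in_code = i + 1
--         format_string = "{0:0"+str(num_bits_in_code)+"b}"
--         # if there are symbols of this length then we need to add the next code
--         if num_symbols > 0:
--             # if this is not the first code of this length then we need to left shift the previous code
--             if i > 0 and first_code_found is True:
--                 # left shift the previous code plus 1 by the difference in bit length
--                 prev_code = prev_code + 1 << bit_diff
--             else:  # if this is the first code of this length then we need to left shift the previous code
--                 prev_code = prev_code << bit_diff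
--                 first_code_found = True
--             # add the codes of this length to the dictionary
--             for j in range(num_symbols):
--                 canonical_code = format_string.format(prev_code + j)
--                 canonical_codes[canonical_code] = sorted_symbols[symbol_index]
--                 symbol_index += 1
--             prev_code = prev_code + j
--             bit_diff = 0
--         bit_diff += 1
--     return canonical_codes
-- ===== SOURCE B (Python) =====
-- def decompress_canonical_dict(compress_lengths, sorted_symbols):
--     """Two-pass canonical-Huffman decode table: first compute the first code of
--     every bit length via the canonical recurrence, then assign symbols."""
--     # pass 1: first integer code for each bit length (length i+1 bits)
--     first_codes = []
--     code = 0
--     for n in compress_lengths: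
--         first_codes.append(code)
--         code = (code + (n if n > 0 else 0)) << 1
--     # pass 2: walk one symbol index through sorted_symbols, emitting the codes
--     canonical_codes = {}
--     symbol_index = 0
--     for i, n in enumerate(compress_lengths):
--         if n > 0:
--             for j in range(n):
--                 canonical_codes[format(first_codes[i] + j, "0%db" % (i + 1))] = sorted_symbols[symbol_index]
--                 symbol_index += 1
--     return canonical_codes
-- ===== Notes on version B (the rewrite author's own statement) =====
-- stated objective: alternative
-- what changed: A fuses shift bookkeeping (prev_code/bit_diff/first_code_found) into one loop; B separates it into two passes: a first-code table per bit length built with the canonical recurrence code=(code+count)<<1, then a second pass assigning symbols from that table.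
import Mathlib
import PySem

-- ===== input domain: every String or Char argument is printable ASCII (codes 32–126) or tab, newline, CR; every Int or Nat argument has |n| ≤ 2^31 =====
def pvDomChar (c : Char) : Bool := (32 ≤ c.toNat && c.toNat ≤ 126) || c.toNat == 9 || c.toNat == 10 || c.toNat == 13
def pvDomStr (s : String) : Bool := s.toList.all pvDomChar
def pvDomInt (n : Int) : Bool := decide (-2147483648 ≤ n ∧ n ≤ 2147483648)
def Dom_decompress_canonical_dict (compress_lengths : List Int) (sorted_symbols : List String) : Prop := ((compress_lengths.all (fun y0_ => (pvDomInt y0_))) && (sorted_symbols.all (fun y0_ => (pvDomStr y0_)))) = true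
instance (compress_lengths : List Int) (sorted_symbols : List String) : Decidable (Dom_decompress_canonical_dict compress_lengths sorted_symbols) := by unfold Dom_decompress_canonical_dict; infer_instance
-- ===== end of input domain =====

-- B re-implements A's fused canonical-Huffman loop as two passes (first-code table, then
-- symbol assignment): same return value, objective 'alternative' (no speed claim).

-- ===== PORT A =====
-- Python's format(x, "0{width}b") (both A and B call this same built-in); exact: sign first, then
-- zero padding to total width, then binary digits (PySem.Int.toBinChars = format(x, 'b')).
def pyZeroPadBin (width : Nat) (x : Int) : String :=
  let ds := PySem.Int.toBinChars x
  if x < 0 then String.mk ('-' :: List.replicate (width - ds.length) '0' ++ ds.drop 1)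
  else String.mk (List.replicate (width - ds.length) '0' ++ ds)

-- state: (canonical_codes, prev_code, bit_diff, symbol_index, first_code_found); bit_diff is
-- always ≥ 0 in A, so Python's `<< bit_diff` is `<<< bit_diff.toNat` exactly.
def decompress_canonical_dict (compress_lengths : List Int) (sorted_symbols : List String) : List (String × String) :=
  let st :=
    (PySem.List.pyRange 0 (PySem.List.len compress_lengths) 1).foldl
      (fun (st : PySem.Dict String String × Int × Int × Int × Bool) i =>
        let num_symbols := PySem.List.pyGetD compress_lengths i 0
        let num_bits_in_code := i + 1
        if num_symbols > 0 then
          let prev1 := if i > 0 ∧ st.2.2.2.2 = true then (st.2.1 + 1) <<< st.2.2.1.toNat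
                       else st.2.1 <<< st.2.2.1.toNat
          let inner :=
            (PySem.List.pyRange 0 num_symbols 1).foldl
              (fun (t : PySem.Dict String String × Int × Int) j =>
                (t.1.insert (pyZeroPadBin num_bits_in_code.toNat (prev1 + j))
                   (PySem.List.pyGetD sorted_symbols t.2.1 ""), t.2.1 + 1, j))
              (st.1, st.2.2.2.1, 0)
          (inner.1, prev1 + inner.2.2, (0 : Int) + 1, inner.2.1, true)
        else (st.1, st.2.1, st.2.2.1 + 1, st.2.2.2.1, st.2.2.2.2))
      (PySem.Dict.empty, 0, 0, 0, false)
  st.1.items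

-- ===== PORT B =====
def decompress_canonical_dict_alt (compress_lengths : List Int) (sorted_symbols : List String) : List (String × String) :=
  -- pass 1: first integer code of each bit length
  let first_codes :=
    (compress_lengths.foldl
      (fun (st : List Int × Int) n =>
        (st.1 ++ [st.2], (st.2 + (if n > 0 then n else 0)) <<< (1 : Nat)))
      ([], 0)).1
  -- pass 2: walk one symbol index through sorted_symbols
  let res :=
    (PySem.List.enumerate compress_lengths).foldl
      (fun (st : PySem.Dict String String × Int) p =>
        if p.2 > 0 then
          (PySem.List.pyRange 0 p.2 1).foldl
            (fun (t : PySem.Dict String String × Int) j =>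
              (t.1.insert (pyZeroPadBin (p.1 + 1).toNat (PySem.List.pyGetD first_codes p.1 0 + j))
                 (PySem.List.pyGetD sorted_symbols t.2 ""), t.2 + 1))
            st
        else st)
      (PySem.Dict.empty, 0)
  res.1.items

-- ===== PRECONDITION & SPEC =====
-- Pre_ excludes exactly the inputs on which Python A raises IndexError (more coded symbols
-- demanded by compress_lengths than sorted_symbols contains); B raises there too.
def Pre_decompress_canonical_dict (compress_lengths : List Int) (sorted_symbols : List String) : Prop :=
  (compress_lengths.map (fun n => if n > 0 then n else 0)).sum ≤ (sorted_symbols.length : Int)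
instance (compress_lengths : List Int) (sorted_symbols : List String) : Decidable (Pre_decompress_canonical_dict compress_lengths sorted_symbols) := by unfold Pre_decompress_canonical_dict; infer_instance

def pvWitness_decompress_canonical_dict : List Int × List String := ([1, 0, 2], ["a", "b", "c"])

def Spec_decompress_canonical_dict (compress_lengths : List Int) (sorted_symbols : List String) (out : List (String × String)) : Prop := out = decompress_canonical_dict_alt compress_lengths sorted_symbols
instance (compress_lengths : List Int) (sorted_symbols : List String) (out : List (String × String)) : Decidable (Spec_decompress_canonical_dict compress_lengths sorted_symbols out) := by unfold Spec_decompress_canonical_dict; infer_instance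

-- ===== CLAIM (what is proved, stated in full; the proofs are below) =====
def Claim_equal_decompress_canonical_dict : Prop := ∀ (compress_lengths : List Int) (sorted_symbols : List String), Dom_decompress_canonical_dict compress_lengths sorted_symbols → Pre_decompress_canonical_dict compress_lengths sorted_symbols → Spec_decompress_canonical_dict compress_lengths sorted_symbols (decompress_canonical_dict compress_lengths sorted_symbols)

-- ===== LEMMAS AND PROOFS =====

-- common reference recursion both ports are reduced to: current bit length s+1, current first
-- code c, dictionary d, symbol index si
def pvRef (ss : List String) : List Int → Nat → Int → PySem.Dict String String → Int → PySem.Dict String String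
  | [], _, _, d, _ => d
  | n :: r, s, c, d, si =>
    if n > 0 then
      let blk :=
        (PySem.List.pyRange 0 n 1).foldl
          (fun (t : PySem.Dict String String × Int) j =>
            (t.1.insert (pyZeroPadBin (s + 1) (c + j)) (PySem.List.pyGetD ss t.2 ""), t.2 + 1))
          (d, si)
      pvRef ss r (s + 1) ((c + n) <<< (1 : Nat)) blk.1 blk.2
    else pvRef ss r (s + 1) (c <<< (1 : Nat)) d si

-- B's first-code scan as a structural recursion
def pvScan : List Int → Int → List Int
  | [], _ => []
  | n :: r, c => c :: pvScan r ((c + (if n > 0 then n else 0)) <<< (1 : Nat))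

theorem pvShl_succ (a : Int) (m : Nat) : a <<< (m + 1) = (a <<< m) <<< (1 : Nat) := by
  rw [Int.shiftLeft_eq, Int.shiftLeft_eq, Int.shiftLeft_eq]; ring

theorem pvShl_zero (m : Nat) : (0 : Int) <<< m = 0 := by
  rw [Int.shiftLeft_eq]; ring

theorem pvRange_ne_nil (n : Int) (hn : 0 < n) : PySem.List.pyRange 0 n 1 ≠ [] := by
  apply List.ne_nil_of_length_pos
  rw [PySem.List.length_pyRange_one]
  omega

theorem pvRange_getLast (n : Int) (hn : 0 < n) (h : PySem.List.pyRange 0 n 1 ≠ []) :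
    (PySem.List.pyRange 0 n 1).getLast h = n - 1 := by
  have e : PySem.List.pyRange 0 n 1 = PySem.List.pyRange 0 (n - 1) 1 ++ [n - 1] := by
    have := PySem.List.pyRange_one_succ_right (a := 0) (b := n - 1) (by omega)
    simpa using this
  have h2 : (PySem.List.pyRange 0 n 1).getLast? = some (n - 1) := by
    rw [e]; simp
  rw [List.getLast?_eq_getLast h] at h2
  exact Option.some.inj h2

-- an A-inner loop also recording the last loop variable j
theorem pvInnerA (g : PySem.Dict String String → Int → Int → PySem.Dict String String) :
    ∀ (l : List Int) (h : l ≠ []) (d : PySem.Dict String String) (si j0 : Int),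
    l.foldl (fun (t : PySem.Dict String String × Int × Int) j => (g t.1 t.2.1 j, t.2.1 + 1, j)) (d, si, j0)
      = ((l.foldl (fun (u : PySem.Dict String String × Int) j => (g u.1 u.2 j, u.2 + 1)) (d, si)).1,
         (l.foldl (fun (u : PySem.Dict String String × Int) j => (g u.1 u.2 j, u.2 + 1)) (d, si)).2,
         l.getLast h)
  | [], h, _, _, _ => absurd rfl h
  | [x], _, d, si, j0 => rfl
  | x :: y :: l, _, d, si, j0 => by
    rw [List.foldl_cons, List.foldl_cons, List.getLast_cons (by simp)]
    exact pvInnerA g (y :: l) (by simp) (g d si x) (si + 1) x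

-- B's pass 1 builds pvScan
theorem pvScanFold : ∀ (l : List Int) (acc : List Int) (c : Int),
    (l.foldl (fun (st : List Int × Int) n =>
        (st.1 ++ [st.2], (st.2 + (if n > 0 then n else 0)) <<< (1 : Nat))) (acc, c)).1
      = acc ++ pvScan l c
  | [], acc, c => by simp [pvScan]
  | n :: l, acc, c => by
    rw [List.foldl_cons]
    rw [pvScanFold l (acc ++ [c]) _]
    simp [pvScan]

-- A's loop, over the remaining (index, count) pairs, computes pvRef
theorem pvPassA (ss : List String) :
    ∀ (r : List Int) (s : Nat) (prev bd si : Int) (found : Bool) (d : PySem.Dict String String),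
    0 ≤ bd → (found = false → prev = 0) → (found = true → 0 < s) →
    ((PySem.List.enumerate r (s : Int)).foldl
      (fun (st : PySem.Dict String String × Int × Int × Int × Bool) (p : Int × Int) =>
        if p.2 > 0 then
          let prev1 := if p.1 > 0 ∧ st.2.2.2.2 = true then (st.2.1 + 1) <<< st.2.2.1.toNat
                       else st.2.1 <<< st.2.2.1.toNat
          let inner :=
            (PySem.List.pyRange 0 p.2 1).foldl
              (fun (t : PySem.Dict String String × Int × Int) j =>
                (t.1.insert (pyZeroPadBin (p.1 + 1).toNat (prev1 + j))
                   (PySem.List.pyGetD ss t.2.1 ""), t.2.1 + 1, j))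
              (st.1, st.2.2.2.1, 0)
          (inner.1, prev1 + inner.2.2, (0 : Int) + 1, inner.2.1, true)
        else (st.1, st.2.1, st.2.2.1 + 1, st.2.2.2.1, st.2.2.2.2))
      (d, prev, bd, si, found)).1
    = pvRef ss r s (if found then (prev + 1) <<< bd.toNat else 0) d si := by
  intro r
  induction r with
  | nil => intro s prev bd si found d _ _ _; simp [PySem.List.enumerate_nil, pvRef]
  | cons n r ih =>
    intro s prev bd si found d hbd hf hs
    have hcast : ((s : Nat) : Int) + 1 = (((s + 1 : Nat)) : Int) := by push_cast; ring
    rw [PySem.List.enumerate_cons, List.foldl_cons]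
    by_cases hn : n > 0
    · have hne := pvRange_ne_nil n hn
      have hlast := pvRange_getLast n hn hne
      by_cases hfd : found = true
      · have hcond : (((s : Nat) : Int) > 0 ∧ found = true) := ⟨by exact_mod_cast hs hfd, hfd⟩
        simp only [hn, hfd, hcond, hcast, and_self, ite_true]
        rw [pvInnerA (fun d0 si0 j =>
              d0.insert (pyZeroPadBin ((((s + 1 : Nat)) : Int)).toNat (((prev + 1) <<< bd.toNat) + j))
                (PySem.List.pyGetD ss si0 "")) (PySem.List.pyRange 0 n 1) hne]
        rw [hlast]
        rw [pvRef, if_pos hn]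
        rw [show ((prev + 1) <<< bd.toNat) + n = (((prev + 1) <<< bd.toNat) + (n - 1) + 1) from by ring]
        simpa using ih (s + 1) (((prev + 1) <<< bd.toNat) + (n - 1)) ((0 : Int) + 1) _ true _
          (by omega) (by simp) (fun _ => by omega)
      · rw [Bool.not_eq_true] at hfd
        have hprev : prev = 0 := hf hfd
        simp only [hn, hfd, hprev, pvShl_zero, hcast, Bool.false_eq_true, and_false, ite_false]
        rw [pvInnerA (fun d0 si0 j =>
              d0.insert (pyZeroPadBin ((((s + 1 : Nat)) : Int)).toNat ((0 : Int) + j))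
                (PySem.List.pyGetD ss si0 "")) (PySem.List.pyRange 0 n 1) hne]
        rw [hlast]
        rw [pvRef, if_pos hn]
        rw [show (0 : Int) + n = ((0 : Int) + (n - 1) + 1) from by ring]
        simpa using ih (s + 1) ((0 : Int) + (n - 1)) ((0 : Int) + 1) _ true _
          (by omega) (by simp) (fun _ => by omega)
    · simp only [hn, hcast, ite_false]
      rw [pvRef, if_neg hn]
      have := ih (s + 1) prev (bd + 1) si found d (by omega) hf (fun _ => by omega)
      rw [this]
      by_cases hfd : found = true
      · have : (bd + 1).toNat = bd.toNat + 1 := by omega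
        rw [hfd, this, pvShl_succ]
        simp
      · simp only [Bool.not_eq_true] at hfd
        rw [hfd]
        simp

-- B's pass 2 computes pvRef, given that the table lookups return pvScan's values
theorem pvPassB (ss : List String) (fcAll : List Int) :
    ∀ (r : List Int) (s : Nat) (c : Int) (d : PySem.Dict String String) (si : Int),
    (∀ k, k < r.length → fcAll.getD (s + k) 0 = (pvScan r c).getD k 0) →
    ((PySem.List.enumerate r (s : Int)).foldl
      (fun (st : PySem.Dict String String × Int) p =>
        if p.2 > 0 then
          (PySem.List.pyRange 0 p.2 1).foldl
            (fun (t : PySem.Dict String String × Int) j =>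
              (t.1.insert (pyZeroPadBin (p.1 + 1).toNat (PySem.List.pyGetD fcAll p.1 0 + j))
                 (PySem.List.pyGetD ss t.2 ""), t.2 + 1))
            st
        else st)
      (d, si)).1
    = pvRef ss r s c d si := by
  intro r
  induction r with
  | nil => intro s c d si _; simp [PySem.List.enumerate_nil, pvRef]
  | cons n r ih =>
    intro s c d si hfc
    have hc : PySem.List.pyGetD fcAll ((s : Nat) : Int) 0 = c := by
      have h0 := hfc 0 (by simp)
      simpa [pvScan] using h0
    have hcast : ((s : Nat) : Int) + 1 = (((s + 1 : Nat)) : Int) := by push_cast; ring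
    rw [PySem.List.enumerate_cons, List.foldl_cons]
    by_cases hn : n > 0
    · have hfc' : ∀ k, k < r.length → fcAll.getD ((s + 1) + k) 0 = (pvScan r ((c + n) <<< (1 : Nat))).getD k 0 := by
        intro k hk
        have h1 := hfc (k + 1) (by simpa using Nat.succ_lt_succ hk)
        rw [show s + (k + 1) = (s + 1) + k from by omega] at h1
        simpa [pvScan, hn] using h1
      simp only [hn, hc, hcast]
      rw [pvRef, if_pos hn]
      exact ih (s + 1) ((c + n) <<< (1 : Nat)) _ _ hfc'
    · have hfc' : ∀ k, k < r.length → fcAll.getD ((s + 1) + k) 0 = (pvScan r (c <<< (1 : Nat))).getD k 0 := by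
        intro k hk
        have h1 := hfc (k + 1) (by simpa using Nat.succ_lt_succ hk)
        rw [show s + (k + 1) = (s + 1) + k from by omega] at h1
        simpa [pvScan, hn] using h1
      simp only [hn, hcast, ite_false]
      rw [pvRef, if_neg hn]
      exact ih (s + 1) (c <<< (1 : Nat)) d si hfc'

theorem pvA_eq (cl : List Int) (ss : List String) :
    decompress_canonical_dict cl ss = (pvRef ss cl 0 0 PySem.Dict.empty 0).items := by
  have h := pvPassA ss cl 0 0 0 0 false PySem.Dict.empty (le_refl 0) (fun _ => rfl) (by simp)
  rw [show ((0 : Nat) : Int) = (0 : Int) from rfl] at h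
  rw [PySem.List.enumerate_eq_map_pyRange (xs := cl) (d := (0 : Int)), List.foldl_map] at h
  simp only [Bool.false_eq_true, ite_false] at h
  unfold decompress_canonical_dict
  exact congrArg PySem.Dict.items h

theorem pvB_eq (cl : List Int) (ss : List String) :
    decompress_canonical_dict_alt cl ss = (pvRef ss cl 0 0 PySem.Dict.empty 0).items := by
  have hscan := pvScanFold cl [] 0
  simp only [List.nil_append] at hscan
  have h := pvPassB ss (pvScan cl 0) cl 0 0 PySem.Dict.empty 0 (by intro k hk; simp)
  rw [show ((0 : Nat) : Int) = (0 : Int) from rfl] at h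
  unfold decompress_canonical_dict_alt
  rw [hscan]
  exact congrArg PySem.Dict.items h

-- ===== VERDICT (by name: the statement is the Claim_ definition above) =====
theorem decompress_canonical_dict_spec : Claim_equal_decompress_canonical_dict := by
  intro cl ss _ _
  unfold Spec_decompress_canonical_dict
  rw [pvA_eq, pvB_eq]
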